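-- pv_equiv track=rewrite | github.com/Jacob-Truelove/Uniform-a-_search | find_route.py | check_city
-- ===== SOURCE A (Python) =====
-- def check_city(list, start, end):
--     valid_start, valid_end = False, False
--
--     i = 0
--
--     for set in list:
--         if start in set:
--             valid_start = True
--         if end in set:
--             valid_end = True
--         i+=1
--
--     return valid_start and valid_end
-- ===== SOURCE B (Python) =====
-- def check_city(list, start, end):
--     combined = set().union(*list)
--     return start in combined and end in combined
-- ===== Notes on version B (the rewrite author's own statement) =====
-- stated objective: simpler
-- what changed: Replaces the per-set flag-setting scan (two membership tests and flag updates per set, plus a dead counter) with building one aggregate set of all cities and then two lookups.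
import Mathlib
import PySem

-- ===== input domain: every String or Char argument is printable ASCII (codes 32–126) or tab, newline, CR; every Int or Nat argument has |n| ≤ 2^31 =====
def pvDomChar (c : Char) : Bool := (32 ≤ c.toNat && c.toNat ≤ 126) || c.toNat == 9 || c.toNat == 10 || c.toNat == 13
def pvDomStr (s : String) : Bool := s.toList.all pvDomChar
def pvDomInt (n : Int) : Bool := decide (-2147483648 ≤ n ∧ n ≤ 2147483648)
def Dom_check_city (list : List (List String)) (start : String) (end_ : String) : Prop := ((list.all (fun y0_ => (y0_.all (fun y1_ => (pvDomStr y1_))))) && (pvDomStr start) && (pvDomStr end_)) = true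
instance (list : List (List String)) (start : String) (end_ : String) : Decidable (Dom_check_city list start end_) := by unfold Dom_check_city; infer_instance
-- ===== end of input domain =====

-- B replaces A's per-set flag-setting scan by building one aggregate set of all
-- cities and doing two lookups afterwards (objective: simpler; drops the dead counter i).

-- ===== PORT A =====
-- loop state: (valid_start, valid_end, i)
def check_city (list : List (List String)) (start : String) (end_ : String) : Bool :=
  let st :=
    list.foldl (fun (st : Bool × Bool × Int) set =>
      let vs := if set.contains start then true else st.1
      let ve := if set.contains end_ then true else st.2.1
      (vs, ve, st.2.2 + 1)) (false, false, 0)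
  st.1 && st.2.1

-- ===== PORT B =====
-- combined = set().union(*list); return start in combined and end in combined
def check_city_alt (list : List (List String)) (start : String) (end_ : String) : Bool :=
  let combined := list.foldl (fun s xs => PySem.Set.update s xs) PySem.Set.empty
  combined.contains start && combined.contains end_

-- ===== PRECONDITION & SPEC =====
def Spec_check_city (list : List (List String)) (start : String) (end_ : String) (out : Bool) : Prop := out = check_city_alt list start end_
instance (list : List (List String)) (start : String) (end_ : String) (out : Bool) : Decidable (Spec_check_city list start end_ out) := by unfold Spec_check_city; infer_instance

-- ===== CLAIM (what is proved, stated in full; the proofs are below) =====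
def Claim_equal_check_city : Prop := ∀ (list : List (List String)) (start : String) (end_ : String), Dom_check_city list start end_ → Spec_check_city list start end_ (check_city list start end_)

-- ===== LEMMAS AND PROOFS =====

theorem foldA_fst (list : List (List String)) (start end_ : String) :
    ∀ vs ve i, (list.foldl (fun (st : Bool × Bool × Int) set =>
      let vs := if set.contains start then true else st.1
      let ve := if set.contains end_ then true else st.2.1
      (vs, ve, st.2.2 + 1)) (vs, ve, i)).1 = (vs || list.any (·.contains start)) := by
  induction list with
  | nil => simp
  | cons h t ih =>
    intro vs ve i
    simp only [List.foldl_cons, List.any_cons, ih]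
    cases hc : h.contains start <;> simp [hc, Bool.or_left_comm]

theorem foldA_snd (list : List (List String)) (start end_ : String) :
    ∀ vs ve i, (list.foldl (fun (st : Bool × Bool × Int) set =>
      let vs := if set.contains start then true else st.1
      let ve := if set.contains end_ then true else st.2.1
      (vs, ve, st.2.2 + 1)) (vs, ve, i)).2.1 = (ve || list.any (·.contains end_)) := by
  induction list with
  | nil => simp
  | cons h t ih =>
    intro vs ve i
    simp only [List.foldl_cons, List.any_cons, ih]
    cases hc : h.contains end_ <;> simp [hc, Bool.or_left_comm]

theorem foldB_contains (list : List (List String)) (x : String) :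
    ∀ s : PySem.Set String,
      (list.foldl (fun s xs => PySem.Set.update s xs) s).contains x
        = (s.contains x || list.any (·.contains x)) := by
  induction list with
  | nil => simp
  | cons h t ih =>
    intro s
    simp only [List.foldl_cons, List.any_cons, ih]
    have : (PySem.Set.update s h).contains x = (s.contains x || h.contains x) := by
      simp [PySem.Set.contains, PySem.Set.mem_update]
    rw [this]
    cases s.contains x <;> simp
  
-- ===== VERDICT (by name: the statement is the Claim_ definition above) =====
theorem check_city_spec : Claim_equal_check_city := by
  intro list start end_ _
  unfold Spec_check_city check_city check_city_alt
  simp only [foldA_fst, foldA_snd, foldB_contains]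
  simp [PySem.Set.empty]
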